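-- pv_equiv track=rewrite | github.com/i-h-bar/advent-of-code-2024 | day_2/main.py | is_safe_with_damper
-- ===== SOURCE A (Python) =====
-- def is_safe(report: list[int]):
--     if not report:
--         return False
--
--     ascending = report[0] < report[1]
--     if not (0 < abs(report[0] - report[1]) < 4):
--         return False
--
--     for a, b in zip(report[1:-1], report[2:]):
--         if (a < b) is not ascending or not (0 < abs(a - b) < 4):
--             return False
--
--     return True
--
-- def is_safe_with_damper(report: list[int]):
--     if not report:
--         return False
--
--     ascending = report[0] < report[1]
--     if not (0 < abs(report[0] - report[1]) < 4):
--         reports = [[num for i, num in enumerate(report) if i != x] for x in range(len(report))]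
--         return any(is_safe(r) for r in reports)
--
--     for i, (a, b) in enumerate(zip(report[1:-1], report[2:])):
--         if (a < b) is not ascending or not (0 < abs(a - b) < 4):
--             reports = [[num for i, num in enumerate(report) if i != x] for x in range(len(report))]
--             return any(is_safe(r) for r in reports)
--
--     return True
-- ===== SOURCE B (Python) =====
-- def _first_bad(xs, lo, hi):
--     """Index of the first adjacent pair whose difference is outside [lo, hi], else None."""
--     for i, (a, b) in enumerate(zip(xs, xs[1:])):
--         if not (lo <= b - a <= hi):
--             return i
--     return None
--
--
-- def is_safe_with_damper(report):
--     if len(report) < 2: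
--         return False
--     j = _first_bad(report, 1, 3)
--     if j is None:
--         return True
--     j2 = _first_bad(report, -3, -1)
--     if j2 is None:
--         return True
--     # Only removing an element of the first violating pair can repair a direction.
--     for k in (j, j + 1, j2, j2 + 1):
--         xs = report[:k] + report[k + 1:]
--         if _first_bad(xs, 1, 3) is None or _first_bad(xs, -3, -1) is None:
--             return True
--     return False
-- ===== Notes on version B (the rewrite author's own statement) =====
-- stated objective: faster
-- what changed: Instead of rebuilding and rechecking every one-element-removed copy of the report (A), B scans once per direction for the first adjacent pair violating the 1..3 (resp. -1..-3) step rule and only tests removing the two elements of that pair, four candidate removals in total.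
-- outside the precondition, e.g. on is_safe_with_damper([1]): A raises IndexError, B returns False; on is_safe_with_damper([5, 5]): A raises IndexError, B returns True
import Mathlib
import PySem

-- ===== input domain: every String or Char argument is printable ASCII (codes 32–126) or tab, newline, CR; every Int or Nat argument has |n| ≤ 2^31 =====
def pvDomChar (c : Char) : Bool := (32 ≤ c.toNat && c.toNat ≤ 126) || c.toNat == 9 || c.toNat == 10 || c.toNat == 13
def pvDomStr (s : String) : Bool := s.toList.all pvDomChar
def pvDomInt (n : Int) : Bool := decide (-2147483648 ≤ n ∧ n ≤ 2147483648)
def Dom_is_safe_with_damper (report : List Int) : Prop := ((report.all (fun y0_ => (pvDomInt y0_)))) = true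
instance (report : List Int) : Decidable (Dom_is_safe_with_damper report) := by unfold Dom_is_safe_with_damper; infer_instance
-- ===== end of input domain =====

-- B replaces A's try-every-removal brute force by a single scan per direction that only
-- tests removing the two elements of the first violating pair (O(n) instead of O(n^2)).

-- ===== PORT A =====
-- Helper `is_safe` of A.  Python raises IndexError on a 1-element report (report[1]);
-- those inputs are excluded by Pre_; the port returns false there.
-- Slices: report[1:-1] = (report.drop 1).dropLast, report[2:] = report.drop 2 (exact here).
def pv_is_safe (report : List Int) : Bool :=
  match report with
  | [] => false
  | [_] => false  -- Python: IndexError (outside Pre_)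
  | r0 :: r1 :: rest =>
    let ascending := decide (r0 < r1)
    if ¬ (0 < (r0 - r1).natAbs ∧ (r0 - r1).natAbs < 4) then false
    else
      (((r1 :: rest).dropLast).zip rest).all
        (fun p => (decide (p.1 < p.2) == ascending) &&
                  decide (0 < (p.1 - p.2).natAbs ∧ (p.1 - p.2).natAbs < 4))

-- [[num for i, num in enumerate(report) if i != x] for x in range(len(report))]
def pv_removals (report : List Int) : List (List Int) :=
  (PySem.List.pyRange 0 report.length 1).map
    (fun x => ((PySem.List.enumerate report 0).filter (fun p => p.1 != x)).map (fun p => p.2))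

def is_safe_with_damper (report : List Int) : Bool :=
  match report with
  | [] => false
  | [_] => false  -- Python: IndexError on report[1] (outside Pre_)
  | r0 :: r1 :: rest =>
    let ascending := decide (r0 < r1)
    if ¬ (0 < (r0 - r1).natAbs ∧ (r0 - r1).natAbs < 4) then
      (pv_removals (r0 :: r1 :: rest)).any pv_is_safe
    else if (((r1 :: rest).dropLast).zip rest).any
        (fun p => !(decide (p.1 < p.2) == ascending) ||
                  !decide (0 < (p.1 - p.2).natAbs ∧ (p.1 - p.2).natAbs < 4)) then
      (pv_removals (r0 :: r1 :: rest)).any pv_is_safe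
    else true

-- ===== PORT B =====
-- _first_bad: index of the first adjacent pair whose difference is outside [lo, hi].
def firstBad (lo hi : Int) : List Int → Option Nat
  | a :: b :: rest =>
    if lo ≤ b - a ∧ b - a ≤ hi then (firstBad lo hi (b :: rest)).map (· + 1)
    else some 0
  | _ => none

-- report[:k] + report[k+1:] = report.eraseIdx k (exact for k ≥ 0).
def is_safe_with_damper_alt (report : List Int) : Bool :=
  if report.length < 2 then false
  else
    match firstBad 1 3 report with
    | none => true
    | some j =>
      match firstBad (-3) (-1) report with
      | none => true
      | some j2 =>
        [j, j + 1, j2, j2 + 1].any (fun k =>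
          let xs := report.eraseIdx k
          (firstBad 1 3 xs).isNone || (firstBad (-3) (-1) xs).isNone)

-- ===== PRECONDITION & SPEC =====
-- Pre_ excludes exactly the inputs where Python A raises IndexError: 1-element reports,
-- and 2-element reports whose only pair is already unsafe (the damper then calls
-- is_safe on 1-element removals, which indexes report[1] out of range).
def Pre_is_safe_with_damper (report : List Int) : Prop :=
  report.length ≠ 1 ∧
  (report.length = 2 →
    0 < (report.getD 0 0 - report.getD 1 0).natAbs ∧ (report.getD 0 0 - report.getD 1 0).natAbs < 4)
instance (report : List Int) : Decidable (Pre_is_safe_with_damper report) := by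
  unfold Pre_is_safe_with_damper; infer_instance

def pvWitness_is_safe_with_damper : List Int := ([1, 2, 7])

def Spec_is_safe_with_damper (report : List Int) (out : Bool) : Prop := out = is_safe_with_damper_alt report
instance (report : List Int) (out : Bool) : Decidable (Spec_is_safe_with_damper report out) := by unfold Spec_is_safe_with_damper; infer_instance

-- ===== CLAIM (what is proved, stated in full; the proofs are below) =====
def Claim_equal_is_safe_with_damper : Prop := ∀ (report : List Int), Dom_is_safe_with_damper report → Pre_is_safe_with_damper report → Spec_is_safe_with_damper report (is_safe_with_damper report)

-- ===== LEMMAS AND PROOFS =====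

theorem firstBad_cons (lo hi a b : Int) (rest : List Int) :
    firstBad lo hi (a :: b :: rest)
    = if lo ≤ b - a ∧ b - a ≤ hi then (firstBad lo hi (b :: rest)).map (· + 1) else some 0 := rfl

theorem firstBad_tail_none {lo hi a : Int} {ys : List Int}
    (h : firstBad lo hi (a :: ys) = none) : firstBad lo hi ys = none := by
  match ys with
  | [] => rfl
  | b :: rest =>
    unfold firstBad at h
    split at h
    · simpa using h
    · simp at h

theorem firstBad_some_lt {lo hi : Int} : ∀ {xs : List Int} {j : Nat},
    firstBad lo hi xs = some j → j + 1 < xs.length := by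
  intro xs
  match xs with
  | [] => intro j h; simp [firstBad] at h
  | [_] => intro j h; simp [firstBad] at h
  | a :: b :: rest =>
    intro j h
    unfold firstBad at h
    split at h
    · rcases Option.map_eq_some_iff.mp h with ⟨j', hj', rfl⟩
      have := firstBad_some_lt hj'
      simpa [Nat.add_lt_add_iff_right] using Nat.succ_lt_succ this
    · simp at h; simp [← h]

-- candidate completeness: a repairing removal must hit the first violating pair
theorem firstBad_erase_cand {lo hi : Int} : ∀ {xs : List Int} {j k : Nat},
    firstBad lo hi xs = some j → firstBad lo hi (xs.eraseIdx k) = none →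
    k = j ∨ k = j + 1 := by
  intro xs
  match xs with
  | [] => intro j k h _; simp [firstBad] at h
  | [_] => intro j k h _; simp [firstBad] at h
  | a :: b :: rest =>
    intro j k h he
    unfold firstBad at h
    split at h
    case isTrue hg =>
      rcases Option.map_eq_some_iff.mp h with ⟨j', hj', rfl⟩
      match k with
      | 0 =>
        simp [List.eraseIdx] at he
        rw [hj'] at he; exact absurd he (by simp)
      | k' + 1 =>
        have he' : firstBad lo hi ((b :: rest).eraseIdx k') = none := by
          have : (a :: b :: rest).eraseIdx (k' + 1) = a :: (b :: rest).eraseIdx k' := rfl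
          rw [this] at he
          exact firstBad_tail_none he
        rcases firstBad_erase_cand hj' he' with h1 | h1 <;> omega
    case isFalse hg =>
      have hj : j = 0 := by simp at h; omega
      subst hj
      match k with
      | 0 => left; rfl
      | 1 => right; rfl
      | k'' + 2 =>
        exfalso
        have : (a :: b :: rest).eraseIdx (k'' + 2) = a :: b :: rest.eraseIdx k'' := rfl
        rw [this] at he
        unfold firstBad at he
        split at he
        · exact hg (by assumption)
        · simp at he

-- zip(report[1:-1], report[2:]) is the adjacent-pairs list of report[1:]
theorem zip_dropLast_pairs : ∀ (ys : List Int),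
    (ys.dropLast).zip (ys.drop 1) = ys.zip (ys.drop 1) := by
  intro ys
  induction ys with
  | nil => rfl
  | cons y t ih =>
    cases t with
    | nil => rfl
    | cons c r =>
      simp only [List.dropLast, List.zip, List.drop, List.zipWith] at *
      exact congrArg _ ih

theorem allDir (d : Bool) (lo hi : Int)
    (hstep : ∀ a b : Int,
      ((decide (a < b) == d) && decide (0 < (a - b).natAbs ∧ (a - b).natAbs < 4))
      = decide (lo ≤ b - a ∧ b - a ≤ hi)) :
    ∀ (ys : List Int),
    ((ys.zip (ys.drop 1)).all
      (fun p => (decide (p.1 < p.2) == d) &&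
                decide (0 < (p.1 - p.2).natAbs ∧ (p.1 - p.2).natAbs < 4)))
    = (firstBad lo hi ys).isNone := by
  intro ys
  match ys with
  | [] => rfl
  | [_] => rfl
  | a :: b :: rest =>
    have tail := allDir d lo hi hstep (b :: rest)
    have hz : (a :: b :: rest).zip ((a :: b :: rest).drop 1) = (a, b) :: (b :: rest).zip ((b :: rest).drop 1) := rfl
    rw [hz]
    simp only [List.all_cons]
    rw [show (decide ((a, b).1 < (a, b).2) == d &&
        decide (0 < ((a, b).1 - (a, b).2).natAbs ∧ ((a, b).1 - (a, b).2).natAbs < 4))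
        = decide (lo ≤ b - a ∧ b - a ≤ hi) from hstep a b]
    rw [tail, firstBad_cons]
    by_cases h : lo ≤ b - a ∧ b - a ≤ hi
    · rw [if_pos h, decide_eq_true h, Bool.true_and]
      cases firstBad lo hi (b :: rest) <;> rfl
    · rw [if_neg h, decide_eq_false h, Bool.false_and]
      rfl

theorem allDir_asc (ys : List Int) :
    ((ys.zip (ys.drop 1)).all
      (fun p => (decide (p.1 < p.2) == true) &&
                decide (0 < (p.1 - p.2).natAbs ∧ (p.1 - p.2).natAbs < 4)))
    = (firstBad 1 3 ys).isNone := by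
  refine allDir true 1 3 ?_ ys
  intro a b
  rw [Bool.eq_iff_iff]
  simp only [Bool.and_eq_true, beq_iff_eq, decide_eq_true_eq]
  omega

theorem allDir_desc (ys : List Int) :
    ((ys.zip (ys.drop 1)).all
      (fun p => (decide (p.1 < p.2) == false) &&
                decide (0 < (p.1 - p.2).natAbs ∧ (p.1 - p.2).natAbs < 4)))
    = (firstBad (-3) (-1) ys).isNone := by
  refine allDir false (-3) (-1) ?_ ys
  intro a b
  rw [Bool.eq_iff_iff]
  simp only [Bool.and_eq_true, beq_iff_eq, decide_eq_true_eq, decide_eq_false_iff_not]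
  omega

-- characterisation of A's helper on lists of length ≥ 2
theorem pv_is_safe_eq (r0 r1 : Int) (rest : List Int) :
    pv_is_safe (r0 :: r1 :: rest)
    = ((firstBad 1 3 (r0 :: r1 :: rest)).isNone || (firstBad (-3) (-1) (r0 :: r1 :: rest)).isNone) := by
  unfold pv_is_safe
  have hz : ((r1 :: rest).dropLast).zip rest = (r1 :: rest).zip ((r1 :: rest).drop 1) :=
    zip_dropLast_pairs (r1 :: rest)
  rw [firstBad_cons 1 3, firstBad_cons (-3) (-1)]
  by_cases h0 : 0 < (r0 - r1).natAbs ∧ (r0 - r1).natAbs < 4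
  · simp only [h0]
    by_cases hlt : r0 < r1
    · have hd : decide (r0 < r1) = true := by simpa using hlt
      simp only [hd, hz]
      rw [allDir_asc (r1 :: rest)]
      have hg : 1 ≤ r1 - r0 ∧ r1 - r0 ≤ 3 := by omega
      have hg' : ¬ (-3 ≤ r1 - r0 ∧ r1 - r0 ≤ -1) := by omega
      rw [if_pos hg, if_neg hg']
      cases firstBad 1 3 (r1 :: rest) <;> rfl
    · have hd : decide (r0 < r1) = false := by simpa using hlt
      simp only [hd, hz]
      rw [allDir_desc (r1 :: rest)]
      have hg : ¬ (1 ≤ r1 - r0 ∧ r1 - r0 ≤ 3) := by omega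
      have hg' : -3 ≤ r1 - r0 ∧ r1 - r0 ≤ -1 := by omega
      rw [if_neg hg, if_pos hg']
      cases firstBad (-3) (-1) (r1 :: rest) <;> rfl
  · simp only [h0, not_false_eq_true, if_true]
    have hg : ¬ (1 ≤ r1 - r0 ∧ r1 - r0 ≤ 3) := by omega
    have hg' : ¬ (-3 ≤ r1 - r0 ∧ r1 - r0 ≤ -1) := by omega
    rw [if_neg hg, if_neg hg']
    rfl

theorem pv_is_safe_eq' (xs : List Int) (h : 2 ≤ xs.length) :
    pv_is_safe xs = ((firstBad 1 3 xs).isNone || (firstBad (-3) (-1) xs).isNone) := by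
  match xs with
  | [] => simp at h
  | [_] => simp at h
  | a :: b :: rest => exact pv_is_safe_eq a b rest

-- A's damper equals "safe, or some removal is safe"
theorem damper_eq (r0 r1 : Int) (rest : List Int) :
    is_safe_with_damper (r0 :: r1 :: rest)
    = (pv_is_safe (r0 :: r1 :: rest) || (pv_removals (r0 :: r1 :: rest)).any pv_is_safe) := by
  unfold is_safe_with_damper pv_is_safe
  by_cases h0 : 0 < (r0 - r1).natAbs ∧ (r0 - r1).natAbs < 4
  · simp only [h0]
    set asc := decide (r0 < r1)
    set P : Int × Int → Bool := fun p => (decide (p.1 < p.2) == asc) &&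
      decide (0 < (p.1 - p.2).natAbs ∧ (p.1 - p.2).natAbs < 4) with hP
    have hneg : (((r1 :: rest).dropLast).zip rest).any (fun p => !(decide (p.1 < p.2) == asc) ||
        !decide (0 < (p.1 - p.2).natAbs ∧ (p.1 - p.2).natAbs < 4))
        = !(((r1 :: rest).dropLast).zip rest).all P := by
      rw [hP]
      induction (((r1 :: rest).dropLast).zip rest) with
      | nil => rfl
      | cons x t iht =>
        simp only [List.any_cons, List.all_cons, Bool.not_and, iht, Bool.or_assoc]
    rw [hneg]
    cases hall : (((r1 :: rest).dropLast).zip rest).all P with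
    | true => simp
    | false => simp
  · simp only [h0, not_false_eq_true, if_true]
    simp

-- the enumerate/filter comprehension removes exactly index k
theorem filter_enum_keep : ∀ (t : List Int) (s x : Int), x < s →
    (PySem.List.enumerate t s).filter (fun p => p.1 != x) = PySem.List.enumerate t s := by
  intro t
  induction t with
  | nil => intro s x _; rfl
  | cons a t ih =>
    intro s x hx
    rw [PySem.List.enumerate_cons, List.filter_cons]
    have : ((s, a).1 != x) = true := by simp; omega
    rw [if_pos this, ih (s + 1) x (by omega)]

theorem filter_enum_erase : ∀ (t : List Int) (s : Int) (k : Nat),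
    ((PySem.List.enumerate t s).filter (fun p => p.1 != (s + (k : Int)))).map (fun p => p.2)
    = t.eraseIdx k := by
  intro t
  induction t with
  | nil => intro s k; rfl
  | cons a t ih =>
    intro s k
    rw [PySem.List.enumerate_cons, List.filter_cons]
    match k with
    | 0 =>
      have : ((s, a).1 != (s + ((0 : Nat) : Int))) = false := by simp
      rw [if_neg (by simp [this])]
      rw [filter_enum_keep t (s + 1) (s + ((0 : Nat) : Int)) (by simp)]
      simp [PySem.List.map_snd_enumerate, List.eraseIdx]
    | k' + 1 =>
      have : ((s, a).1 != (s + ((k' + 1 : Nat) : Int))) = true := by simp; omega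
      rw [if_pos this, List.map_cons]
      have hx : s + ((k' + 1 : Nat) : Int) = (s + 1) + (k' : Int) := by push_cast; ring
      rw [hx, ih (s + 1) k']
      rfl

theorem removals_eq (report : List Int) :
    pv_removals report = (List.range report.length).map (fun k => report.eraseIdx k) := by
  unfold pv_removals
  rw [PySem.List.pyRange_one]
  simp only [Int.sub_zero, Int.toNat_natCast, List.map_map]
  apply List.map_congr_left
  intro k hk
  simpa using filter_enum_erase report 0 k

-- ===== VERDICT (by name: the statement is the Claim_ definition above) =====
theorem is_safe_with_damper_spec : Claim_equal_is_safe_with_damper := by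
  intro report _ hpre
  unfold Spec_is_safe_with_damper
  match report with
  | [] => rfl
  | [x] => exact absurd rfl hpre.1
  | [r0, r1] =>
    have hp : 0 < (r0 - r1).natAbs ∧ (r0 - r1).natAbs < 4 := by simpa using hpre.2 rfl
    rw [damper_eq r0 r1 [], pv_is_safe_eq r0 r1 []]
    unfold is_safe_with_damper_alt
    rw [if_neg (by simp)]
    by_cases hlt : r0 < r1
    · have hg : 1 ≤ r1 - r0 ∧ r1 - r0 ≤ 3 := by omega
      rw [firstBad_cons 1 3, if_pos hg]
      simp [firstBad]
    · have hg : ¬ (1 ≤ r1 - r0 ∧ r1 - r0 ≤ 3) := by omega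
      have hg' : -3 ≤ r1 - r0 ∧ r1 - r0 ≤ -1 := by omega
      rw [firstBad_cons 1 3, if_neg hg, firstBad_cons (-3) (-1), if_pos hg']
      simp [firstBad]
  | r0 :: r1 :: c :: rs =>
    set report := r0 :: r1 :: c :: rs with hrep
    have hlen : 3 ≤ report.length := by simp [hrep]
    rw [damper_eq r0 r1 (c :: rs), ← hrep]
    rw [pv_is_safe_eq' report (by omega), removals_eq report]
    unfold is_safe_with_damper_alt
    rw [if_neg (by omega)]
    cases h1 : firstBad 1 3 report with
    | none => simp
    | some j =>
      cases h2 : firstBad (-3) (-1) report with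
      | none => simp [h2]
      | some j2 =>
        simp only [h1, h2, Option.isNone_some, Bool.or_self, Bool.false_or]
        have hjlt : j + 1 < report.length := firstBad_some_lt h1
        have hj2lt : j2 + 1 < report.length := firstBad_some_lt h2
        have hplen : ∀ k : Nat, k < report.length → 2 ≤ (report.eraseIdx k).length := by
          intro k hk
          rw [List.length_eraseIdx_of_lt hk]; omega
        rw [Bool.eq_iff_iff]
        simp only [List.any_eq_true, List.mem_map, List.mem_range]
        constructor
        · rintro ⟨xs, ⟨k, hk, rfl⟩, hsafe⟩
          rw [pv_is_safe_eq' _ (hplen k hk)] at hsafe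
          rcases Bool.or_eq_true _ _ |>.mp hsafe with hs | hs
          · have hn : firstBad 1 3 (report.eraseIdx k) = none := by
              cases hfb : firstBad 1 3 (report.eraseIdx k) <;> simp [hfb] at hs ⊢
            rcases firstBad_erase_cand h1 hn with h | h
            · exact ⟨k, by simp [h], by simp [hn]⟩
            · exact ⟨k, by simp [h], by simp [hn]⟩
          · have hn : firstBad (-3) (-1) (report.eraseIdx k) = none := by
              cases hfb : firstBad (-3) (-1) (report.eraseIdx k) <;> simp [hfb] at hs ⊢
            rcases firstBad_erase_cand h2 hn with h | h
            · exact ⟨k, by simp [h], by simp [hn]⟩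
            · exact ⟨k, by simp [h], by simp [hn]⟩
        · rintro ⟨k, hkmem, hk⟩
          have hklt : k < report.length := by
            simp only [List.mem_cons, List.mem_singleton] at hkmem
            rcases hkmem with rfl | rfl | rfl | h
            · omega
            · omega
            · omega
            · simp at h; omega
          refine ⟨report.eraseIdx k, ⟨k, hklt, rfl⟩, ?_⟩
          rw [pv_is_safe_eq' _ (hplen k hklt)]
          simpa using hk
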